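-- pv_equiv track=rewrite | github.com/algorithmFor2021/dain_song | 그리디/BOJ-1092.py | find_times
-- ===== SOURCE A (Python) =====
-- def find_times(boxes, cranes):
--     if cranes[0] < boxes[0]:
--         return -1
--
--     count = 0
--     while boxes:
--         count += 1
--         for crane in cranes:
--             # 현재 크레인보다 작은 박스중 가장 큰 값을 담기
--             for i in range(len(boxes)):
--                 # 역순으로 정렬되어 있으므로 break 하게되면 가장 큰값만 빠르게 제거
--                 if boxes[i] <= crane:
--                     boxes.pop(i)
--                     break
--     return count
-- ===== SOURCE B (Python) =====
-- def find_times(boxes, cranes):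
--     # Box-major greedy: each minute, scan boxes once, assigning each box to the
--     # first still-available crane strong enough for it (A mutates `boxes`; B does not).
--     if cranes[0] < boxes[0]:
--         return -1
--     count = 0
--     while boxes:
--         count += 1
--         avail = list(cranes)
--         remaining = []
--         for b in boxes:
--             for j in range(len(avail)):
--                 if b <= avail[j]:
--                     del avail[j]
--                     break
--             else:
--                 remaining.append(b)
--         boxes = remaining
--     return count
-- ===== Notes on version B (the rewrite author's own statement) =====
-- stated objective: alternative
-- what changed: Per minute, B makes one left-to-right sweep over the boxes, assigning each box to the first still-available crane strong enough for it (shrinking an avail-crane list) and building the survivor list, instead of A's crane-major pass where every crane rescans the box list from the front and pops; a matching lemma proves both remove exactly the same boxes each minute.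
import Mathlib
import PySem

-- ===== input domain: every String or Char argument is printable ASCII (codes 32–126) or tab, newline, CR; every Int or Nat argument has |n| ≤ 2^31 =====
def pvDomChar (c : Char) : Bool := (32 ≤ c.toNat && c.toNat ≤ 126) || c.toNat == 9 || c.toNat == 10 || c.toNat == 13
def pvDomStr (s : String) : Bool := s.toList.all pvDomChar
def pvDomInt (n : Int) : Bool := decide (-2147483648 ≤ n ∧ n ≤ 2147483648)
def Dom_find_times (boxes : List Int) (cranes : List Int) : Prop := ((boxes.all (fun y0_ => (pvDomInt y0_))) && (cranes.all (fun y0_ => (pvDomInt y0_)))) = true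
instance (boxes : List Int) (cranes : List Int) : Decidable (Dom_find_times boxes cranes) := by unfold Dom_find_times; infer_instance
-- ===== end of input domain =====

-- B replaces A's crane-major rescans (each crane rescans and pops from the box list)
-- by a single box-major sweep per minute assigning each box to the first available
-- strong-enough crane; same cost class, proved to remove exactly the same boxes.
-- A empties the caller's `boxes` list in place; equivalence is about the return value.

-- ===== PORT A =====
-- A's inner `for i in range(len(boxes)): if boxes[i] <= crane: boxes.pop(i); break`:
-- scan for the first box ≤ crane and drop it.
def popFirstLe (bs : List Int) (c : Int) : List Int :=
  match bs with
  | [] => []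
  | b :: t => if b ≤ c then t else b :: popFirstLe t c

-- A's `while boxes:` loop; fuel = boxes.length + 1 is enough on every input where
-- the Python loop terminates (each minute removes at least one box there).
def loopA : Nat → List Int → List Int → Int → Int
  | 0, _, _, count => count
  | f + 1, boxes, cranes, count =>
      if boxes.isEmpty then count
      else loopA f (cranes.foldl popFirstLe boxes) cranes (count + 1)

def find_times (boxes : List Int) (cranes : List Int) : Int :=
  match cranes, boxes with
  | c0 :: _, b0 :: _ =>
      if c0 < b0 then -1 else loopA (boxes.length + 1) boxes cranes 0
  | _, _ => 0   -- Python raises IndexError on empty boxes/cranes; outside Pre_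

-- ===== PORT B =====
-- B's inner `for j in range(len(avail)): if b <= avail[j]: del avail[j]; break`:
-- remove the first crane that can lift b, or report none.
def takeFirstGe : List Int → Int → Option (List Int)
  | [], _ => none
  | c :: t, b => if b ≤ c then some t else (takeFirstGe t b).map (fun r => c :: r)

-- one minute: sweep the boxes once, consuming cranes; survivors go to `remaining`
def minuteB : List Int → List Int → List Int
  | [], _ => []
  | b :: bs, cs =>
      match takeFirstGe cs b with
      | some cs' => minuteB bs cs'
      | none => b :: minuteB bs cs

def loopB : Nat → List Int → List Int → Int
  | 0, _, _ => 0
  | f + 1, boxes, cranes =>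
      if boxes.isEmpty then 0 else 1 + loopB f (minuteB boxes cranes) cranes

def find_times_alt (boxes : List Int) (cranes : List Int) : Int :=
  match cranes with
  | [] => 0   -- Python raises IndexError on empty boxes/cranes; outside Pre_
  | c0 :: _ =>
      match boxes with
      | [] => 0
      | b0 :: _ =>
          if c0 < b0 then -1 else loopB (boxes.length + 1) boxes cranes

-- ===== PRECONDITION & SPEC =====
-- Pre_ excludes only inputs where Python A does not return: empty boxes/cranes
-- (IndexError on [0]) and inputs where some box exceeds every crane while the
-- initial guard does not fire (the while loop then never terminates).
def Pre_find_times (boxes : List Int) (cranes : List Int) : Prop :=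
  boxes ≠ [] ∧ cranes ≠ [] ∧
    (cranes.headI < boxes.headI ∨ ∀ b ∈ boxes, ∃ c ∈ cranes, b ≤ c)

instance (boxes : List Int) (cranes : List Int) : Decidable (Pre_find_times boxes cranes) := by
  unfold Pre_find_times; infer_instance

def pvWitness_find_times : List Int × List Int := ([3, 2, 1], [5, 1])

def Spec_find_times (boxes : List Int) (cranes : List Int) (out : Int) : Prop := out = find_times_alt boxes cranes
instance (boxes : List Int) (cranes : List Int) (out : Int) : Decidable (Spec_find_times boxes cranes out) := by unfold Spec_find_times; infer_instance

-- ===== CLAIM (what is proved, stated in full; the proofs are below) =====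
def Claim_equal_find_times : Prop := ∀ (boxes : List Int) (cranes : List Int), Dom_find_times boxes cranes → Pre_find_times boxes cranes → Spec_find_times boxes cranes (find_times boxes cranes)

-- ===== LEMMAS AND PROOFS =====

-- cranes all too weak for b leave b in front and act on the tail
theorem foldl_popFirstLe_cons_of_lt (cs : List Int) (b : Int) (bs : List Int)
    (h : ∀ c ∈ cs, ¬ b ≤ c) :
    cs.foldl popFirstLe (b :: bs) = b :: cs.foldl popFirstLe bs := by
  induction cs generalizing bs with
  | nil => rfl
  | cons c cs ih =>
      have hc : ¬ b ≤ c := h c (List.mem_cons_self ..)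
      simp only [List.foldl_cons, popFirstLe, if_neg hc]
      exact ih _ (fun x hx => h x (List.mem_cons_of_mem _ hx))

theorem takeFirstGe_none {cs : List Int} {b : Int}
    (h : takeFirstGe cs b = none) : ∀ c ∈ cs, ¬ b ≤ c := by
  induction cs with
  | nil => simp
  | cons c cs ih =>
      intro x hx
      by_cases hb : b ≤ c
      · simp [takeFirstGe, if_pos hb] at h
      · simp only [takeFirstGe, if_neg hb, Option.map_eq_none_iff] at h
        rcases List.mem_cons.mp hx with rfl | hx
        · exact hb
        · exact ih h x hx

theorem takeFirstGe_some {cs cs' : List Int} {b : Int}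
    (h : takeFirstGe cs b = some cs') :
    ∃ cs1 c cs2, cs = cs1 ++ c :: cs2 ∧ cs' = cs1 ++ cs2 ∧ b ≤ c ∧ ∀ x ∈ cs1, ¬ b ≤ x := by
  induction cs generalizing cs' with
  | nil => simp [takeFirstGe] at h
  | cons c cs ih =>
      by_cases hb : b ≤ c
      · refine ⟨[], c, cs, rfl, ?_, hb, by simp⟩
        simpa [takeFirstGe, if_pos hb] using h.symm
      · simp only [takeFirstGe, if_neg hb, Option.map_eq_some_iff] at h
        obtain ⟨r, hr, rfl⟩ := h
        obtain ⟨cs1, d, cs2, rfl, rfl, hbd, h1⟩ := ih hr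
        refine ⟨c :: cs1, d, cs2, rfl, rfl, hbd, ?_⟩
        intro x hx
        rcases List.mem_cons.mp hx with rfl | hx
        · exact hb
        · exact h1 x hx

theorem foldl_popFirstLe_nil (cs : List Int) : cs.foldl popFirstLe [] = [] := by
  induction cs with
  | nil => rfl
  | cons c cs ih => simpa [popFirstLe] using ih

-- main per-minute lemma: the box-major sweep removes exactly what A's crane-major pass removes
theorem minuteB_eq_foldl (bs : List Int) : ∀ cs : List Int,
    minuteB bs cs = cs.foldl popFirstLe bs := by
  induction bs with
  | nil => intro cs; simp [minuteB, foldl_popFirstLe_nil]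
  | cons b bs ih =>
      intro cs
      cases h : takeFirstGe cs b with
      | none =>
          rw [foldl_popFirstLe_cons_of_lt cs b bs (takeFirstGe_none h)]
          simp [minuteB, h, ih]
      | some cs' =>
          obtain ⟨cs1, c, cs2, rfl, rfl, hbc, h1⟩ := takeFirstGe_some h
          simp only [minuteB, h]
          rw [ih, List.foldl_append, List.foldl_append, List.foldl_cons,
            foldl_popFirstLe_cons_of_lt cs1 b bs h1]
          simp [popFirstLe, if_pos hbc]

theorem loopA_eq_loopB (f : Nat) : ∀ (bs cs : List Int) (count : Int),
    loopA f bs cs count = count + loopB f bs cs := by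
  induction f with
  | zero => intro bs cs count; simp [loopA, loopB]
  | succ f ih =>
      intro bs cs count
      simp only [loopA, loopB]
      by_cases h : bs.isEmpty
      · simp [h]
      · simp [h, ih, minuteB_eq_foldl]
        ring

-- ===== VERDICT (by name: the statement is the Claim_ definition above) =====
theorem find_times_spec : Claim_equal_find_times := by
  intro boxes cranes _ _
  unfold Spec_find_times find_times find_times_alt
  cases cranes with
  | nil => rfl
  | cons c0 cs =>
      cases boxes with
      | nil => rfl
      | cons b0 bs =>
          by_cases h : c0 < b0
          · simp [h]
          · simp only [h, loopA_eq_loopB]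
            simp
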